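-- pv_equiv track=rewrite | github.com/dbswl4951/baekjoon_algorithm | toss/ex2.py | solution
-- ===== SOURCE A (Python) =====
-- def solution(servers, sticky, requests):
--     result = [[] for _ in range(servers)]
--     if not sticky:
--         sIdx,rIdx=0,0
--         while rIdx<len(requests):
--             result[sIdx].append(requests[rIdx])
--             sIdx+=1
--             rIdx+=1
--             if sIdx>=servers: sIdx=0
--     else:
--         sIdx, rIdx,remember = 0, 0,requests[0]
--         while rIdx<len(requests):
--             if rIdx==0:
--                 result[0].append(requests[0])
--                 sIdx+=1
--             elif remember==requests[rIdx]:
--                 result[sIdx-1].append(requests[rIdx])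
--             else:
--                 remember=requests[rIdx]
--                 result[sIdx].append(requests[rIdx])
--                 sIdx+=1
--             rIdx += 1
--             if sIdx>=servers: sIdx=0
--     return result
-- ===== SOURCE B (Python) =====
-- def solution(servers, sticky, requests):
--     result = [[] for _ in range(servers)]
--     if sticky:
--         prev = requests[0]
--         groups = [[prev]]
--         for r in requests[1:]:
--             if r == prev:
--                 groups[-1].append(r)
--             else:
--                 groups.append([r])
--                 prev = r
--     else:
--         groups = [[r] for r in requests]
--     for i, g in enumerate(groups):
--         result[i % servers].extend(g)
--     return result
-- ===== Notes on version B (the rewrite author's own statement) =====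
-- stated objective: simpler
-- what changed: A walks requests once with a mutable server pointer (sIdx, sIdx-1 with negative-index wraparound, manual reset) deciding a target server per element; B is a two-phase pass: it first builds the list of request groups (maximal runs when sticky, singletons otherwise) and then deals group i to server i % servers, with no pointer arithmetic.
import Mathlib
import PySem

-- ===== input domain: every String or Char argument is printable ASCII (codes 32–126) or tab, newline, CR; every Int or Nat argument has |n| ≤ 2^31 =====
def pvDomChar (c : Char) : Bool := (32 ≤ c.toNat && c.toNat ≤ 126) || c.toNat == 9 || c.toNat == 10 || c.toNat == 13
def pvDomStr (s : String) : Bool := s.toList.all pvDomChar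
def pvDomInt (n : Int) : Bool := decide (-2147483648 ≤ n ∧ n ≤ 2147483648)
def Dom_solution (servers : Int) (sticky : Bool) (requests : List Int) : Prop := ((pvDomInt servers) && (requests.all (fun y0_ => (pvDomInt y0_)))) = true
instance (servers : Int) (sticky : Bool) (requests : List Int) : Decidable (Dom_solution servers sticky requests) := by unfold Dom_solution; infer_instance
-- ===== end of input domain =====

-- B replaces A's per-element server-pointer arithmetic by a two-phase pass: first build the
-- list of request groups (runs when sticky, singletons otherwise), then deal group i to
-- server i % servers; objective: simpler.

-- Python semantics of `lst[i]` mutation (append/extend): negative index counts from the end;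
-- out of range Python raises IndexError (excluded by Pre_), here a no-op.
def pyModAt (res : List (List Int)) (i : Int) (f : List Int → List Int) : List (List Int) :=
  match PySem.List.pyIdx? res.length i with
  | some j => res.modify j f
  | none => res

-- ===== PORT A =====
def solution (servers : Int) (sticky : Bool) (requests : List Int) : List (List Int) :=
  let result : List (List Int) := (List.range servers.toNat).map fun _ => []
  if !sticky then
    -- state (result, sIdx); rIdx is the position in the traversal
    (requests.foldl (fun (st : List (List Int) × Int) r =>
        let res := pyModAt st.1 st.2 (· ++ [r])
        let s := st.2 + 1
        (res, if s ≥ servers then 0 else s))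
      (result, 0)).1
  else
    -- remember = requests[0]; on empty sticky input Python raises IndexError (outside Pre_)
    let remember : Int := requests.headD 0
    -- state (result, sIdx, rIdx, remember)
    (requests.foldl (fun (st : List (List Int) × Int × Int × Int) r =>
        let res := st.1
        let sIdx := st.2.1
        let rIdx := st.2.2.1
        let rem := st.2.2.2
        let st' :=
          if rIdx = 0 then (pyModAt res 0 (· ++ [r]), sIdx + 1, rem)
          else if rem = r then (pyModAt res (sIdx - 1) (· ++ [r]), sIdx, rem)
          else (pyModAt res sIdx (· ++ [r]), sIdx + 1, r)
        (st'.1, (if st'.2.1 ≥ servers then 0 else st'.2.1), rIdx + 1, st'.2.2))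
      (result, 0, 0, remember)).1

-- ===== PORT B =====
def solution_alt (servers : Int) (sticky : Bool) (requests : List Int) : List (List Int) :=
  let result : List (List Int) := (List.range servers.toNat).map fun _ => []
  let groups : List (List Int) :=
    if sticky then
      -- prev = requests[0]; on empty sticky input Python raises IndexError (outside Pre_)
      let prev : Int := requests.headD 0
      ((requests.drop 1).foldl (fun (st : List (List Int) × Int) r =>
          if r = st.2 then (st.1.modify (st.1.length - 1) (· ++ [r]), st.2)  -- groups[-1].append(r): groups is never empty
          else (st.1 ++ [[r]], r))
        ([[prev]], prev)).1
    else requests.map fun r => [r]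
  -- for i, g in enumerate(groups): result[i % servers].extend(g)
  (PySem.List.enumerate groups).foldl
    (fun res p => pyModAt res (PySem.Int.mod p.1 servers) (· ++ p.2)) result

-- ===== PRECONDITION & SPEC =====
-- Pre_ excludes exactly the inputs where A raises IndexError: sticky with empty requests
-- (requests[0]), and nonempty requests with servers ≤ 0 (result[0] on an empty result list).
def Pre_solution (servers : Int) (sticky : Bool) (requests : List Int) : Prop :=
  (sticky = true → requests ≠ []) ∧ (requests ≠ [] → 0 < servers)
instance (servers : Int) (sticky : Bool) (requests : List Int) : Decidable (Pre_solution servers sticky requests) := by unfold Pre_solution; infer_instance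

def pvWitness_solution : Int × Bool × List Int := (3, true, [1, 1, 2, 2, 2, 3, 1])

def Spec_solution (servers : Int) (sticky : Bool) (requests : List Int) (out : List (List Int)) : Prop := out = solution_alt servers sticky requests
instance (servers : Int) (sticky : Bool) (requests : List Int) (out : List (List Int)) : Decidable (Spec_solution servers sticky requests out) := by unfold Spec_solution; infer_instance

-- ===== CLAIM (what is proved, stated in full; the proofs are below) =====
def Claim_equal_solution : Prop := ∀ (servers : Int) (sticky : Bool) (requests : List Int), Dom_solution servers sticky requests → Pre_solution servers sticky requests → Spec_solution servers sticky requests (solution servers sticky requests)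

-- ===== LEMMAS AND PROOFS =====

-- maximal prefix of elements equal to `rem`, and the remainder
def contSplit (rem : Int) : List Int → List Int × List Int
  | [] => ([], [])
  | r :: t => if r = rem then ((r :: (contSplit rem t).1), (contSplit rem t).2) else ([], r :: t)

theorem contSplit_snd_length_le (rem : Int) (t : List Int) : (contSplit rem t).2.length ≤ t.length := by
  induction t with
  | nil => simp [contSplit]
  | cons r t ih =>
    by_cases h : r = rem
    · simp [contSplit, h]; omega
    · simp [contSplit, h]

-- the maximal runs of equal consecutive elements
def runs : List Int → List (List Int)
  | [] => []
  | r :: t => (r :: (contSplit r t).1) :: runs (contSplit r t).2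
termination_by l => l.length
decreasing_by
  have := contSplit_snd_length_le r t
  simp only [List.length_cons]; omega

theorem runs_cons (r : Int) (t : List Int) :
    runs (r :: t) = (r :: (contSplit r t).1) :: runs (contSplit r t).2 := by
  rw [runs]

-- deal groups round-robin, group at running index i going to server (i % N)
def distFrom (N : Int) (i : Int) (res : List (List Int)) : List (List Int) → List (List Int)
  | [] => res
  | g :: gs => distFrom N (i + 1) (pyModAt res (PySem.Int.mod i N) (· ++ g)) gs

theorem length_pyModAt (res : List (List Int)) (i : Int) (f : List Int → List Int) :
    (pyModAt res i f).length = res.length := by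
  unfold pyModAt
  cases h : PySem.List.pyIdx? res.length i <;> simp

theorem modify_ne_nil {l : List (List Int)} (h : l ≠ []) (j : Nat) (f : List Int → List Int) :
    l.modify j f ≠ [] := by
  cases l with
  | nil => exact absurd rfl h
  | cons a t => rw [List.modify_cons]; split <;> simp

theorem modify_modify_same {α : Type} (l : List α) (j : Nat) (f g : α → α) :
    (l.modify j f).modify j g = l.modify j (fun x => g (f x)) := by
  apply List.ext_getElem
  · simp
  · intro k h1 h2
    simp only [List.getElem_modify]
    by_cases h : j = k <;> simp [h]

theorem modify_id (l : List (List Int)) (j : Nat) :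
    l.modify j (fun x => x) = l := by
  apply List.ext_getElem
  · simp
  · intro k h1 h2
    simp only [List.getElem_modify]
    split <;> simp

theorem modify_append_nil (l : List (List Int)) (j : Nat) :
    l.modify j (· ++ ([] : List Int)) = l := by
  apply List.ext_getElem
  · simp
  · intro k h1 h2
    simp only [List.getElem_modify]
    split <;> simp

theorem pyModAt_id (res : List (List Int)) (i : Int) :
    pyModAt res i (fun x => x) = res := by
  unfold pyModAt
  cases h : PySem.List.pyIdx? res.length i
  · rfl
  · exact modify_id _ _

theorem pyModAt_nil (res : List (List Int)) (i : Int) :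
    pyModAt res i (· ++ ([] : List Int)) = res := by
  unfold pyModAt
  cases h : PySem.List.pyIdx? res.length i
  · rfl
  · exact modify_append_nil _ _

theorem pyModAt_comp (res : List (List Int)) (i : Int) (a b : List Int) :
    pyModAt (pyModAt res i (· ++ a)) i (· ++ b) = pyModAt res i (· ++ (a ++ b)) := by
  unfold pyModAt
  cases h : PySem.List.pyIdx? res.length i with
  | none => simp [h]
  | some j =>
    simp only [List.length_modify, h]
    rw [modify_modify_same]
    simp [List.append_assoc]

theorem pyModAt_resolve (res : List (List Int)) (i i' : Int) (f : List Int → List Int)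
    (h0 : 0 ≤ i') (h1 : i' < (res.length : Int)) (h2 : i = i' ∨ i = i' - res.length) :
    pyModAt res i f = res.modify i'.toNat f := by
  unfold pyModAt
  have hix : PySem.List.pyIdx? res.length i = some i'.toNat := by
    rcases h2 with h | h <;> subst h <;> simp only [PySem.List.pyIdx?] <;> split_ifs <;>
      first
      | rfl
      | omega
      | (congr 1; omega)
  rw [hix]

theorem modify_append_last (gs : List (List Int)) (x : List Int) (f : List Int → List Int) :
    (gs ++ [x]).modify gs.length f = gs ++ [f x] := by
  induction gs with
  | nil => simp [List.modify_cons]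
  | cons g gs ih => simp [List.modify_cons, ih]

-- B's grouping loop builds exactly: last group of the accumulator extended by the
-- continuation run of `prev`, followed by the runs of the remainder.
theorem bgroups (t : List Int) : ∀ (gs : List (List Int)) (prev : Int), gs ≠ [] →
    (t.foldl (fun (st : List (List Int) × Int) r =>
        if r = st.2 then (st.1.modify (st.1.length - 1) (· ++ [r]), st.2)
        else (st.1 ++ [[r]], r)) (gs, prev)).1
    = gs.modify (gs.length - 1) (· ++ (contSplit prev t).1) ++ runs (contSplit prev t).2 := by
  induction t with
  | nil => intro gs prev h; simp [contSplit, runs, modify_id, modify_append_nil]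
  | cons r t ih =>
    intro gs prev h
    by_cases hr : r = prev
    · subst hr
      simp only [List.foldl_cons, contSplit, if_pos rfl, reduceIte]
      rw [ih _ _ (modify_ne_nil h _ _)]
      · simp only [List.length_modify]
        rw [modify_modify_same]
        simp [List.append_assoc]
    · simp only [List.foldl_cons, if_neg hr, contSplit, if_neg hr]
      rw [ih _ _ (by simp)]
      rw [modify_append_nil]
      have hlen : (gs ++ [[r]]).length - 1 = gs.length := by simp
      rw [hlen, modify_append_last]
      conv_rhs => rw [runs]
      simp [List.append_assoc]

-- the distributing loop over enumerate is distFrom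
theorem dist_enum (N : Int) (gs : List (List Int)) : ∀ (i : Int) (res : List (List Int)),
    (PySem.List.enumerate gs i).foldl
        (fun res p => pyModAt res (PySem.Int.mod p.1 N) (· ++ p.2)) res
    = distFrom N i res gs := by
  induction gs with
  | nil => intro i res; simp [PySem.List.enumerate_nil, distFrom]
  | cons g gs ih => intro i res; simp [PySem.List.enumerate_cons, distFrom, ih]

-- index arithmetic for the wrapped server pointer
theorem emod_bounds {N : Int} (hN : 0 < N) (g : Int) : 0 ≤ g % N ∧ g % N < N :=
  ⟨Int.emod_nonneg g (by omega), Int.emod_lt_of_pos g hN⟩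

theorem emod_succ {N : Int} (hN : 0 < N) (g : Int) :
    (g + 1) % N = if g % N + 1 ≥ N then 0 else g % N + 1 := by
  have e1 : g + 1 = (g % N + 1) + N * (g / N) := by
    have := Int.emod_add_ediv g N; omega
  rw [e1, Int.add_mul_emod_self_left]
  have hb := emod_bounds hN g
  split
  · have : g % N + 1 = N := by omega
    rw [this, Int.emod_self]
  · exact Int.emod_eq_of_lt (by omega) (by omega)

theorem emod_pred {N : Int} (hN : 0 < N) (g : Int) :
    (g - 1) % N = if g % N = 0 then N - 1 else g % N - 1 := by
  have e1 : g - 1 = (g % N - 1) + N * (g / N) := by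
    have := Int.emod_add_ediv g N; omega
  rw [e1, Int.add_mul_emod_self_left]
  obtain ⟨hb0, hb1⟩ := emod_bounds hN g
  by_cases h0 : g % N = 0
  · rw [if_pos h0, h0]
    have h2 : (0 - 1 : Int) = (N - 1) + N * (-1) := by ring
    rw [h2, Int.add_mul_emod_self_left]
    exact Int.emod_eq_of_lt (by omega) (by omega)
  · rw [if_neg h0]
    exact Int.emod_eq_of_lt (by omega) (by omega)

-- A's nonsticky loop from pointer g % N distributes the remaining singletons starting at index g
theorem arestNS {N : Int} (hN : 0 < N) (t : List Int) : ∀ (res : List (List Int)) (g : Int),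
    0 ≤ g → (res.length : Int) = N →
    (t.foldl (fun (st : List (List Int) × Int) r =>
        let res := pyModAt st.1 st.2 (· ++ [r])
        let s := st.2 + 1
        (res, if s ≥ N then 0 else s)) (res, g % N)).1
    = distFrom N g res (t.map fun r => [r]) := by
  induction t with
  | nil => intro res g _ _; simp [distFrom]
  | cons r t ih =>
    intro res g hg hlen
    have hb := emod_bounds hN g
    simp only [List.foldl_cons, List.map_cons, distFrom]
    have hmod : PySem.Int.mod g N = g % N := PySem.Int.mod_eq_emod_of_pos hN
    rw [hmod] at *
    have hwrap : (if g % N + 1 ≥ N then 0 else g % N + 1) = (g + 1) % N := (emod_succ hN g).symm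
    simp only [hwrap]
    rw [ih _ (g + 1) (by omega) (by rw [length_pyModAt]; exact hlen)]

-- A's sticky loop (past the first request) from pointer g % N, with g ≥ 1 groups placed so far
-- and `rem` the last request seen: continuation run goes to (g-1) % N, new runs start at g % N.
theorem arest {N : Int} (hN : 0 < N) (t : List Int) :
    ∀ (res : List (List Int)) (g k rem : Int),
    1 ≤ g → 1 ≤ k → (res.length : Int) = N →
    (t.foldl (fun (st : List (List Int) × Int × Int × Int) r =>
        let res := st.1
        let sIdx := st.2.1
        let rIdx := st.2.2.1
        let rm := st.2.2.2
        let st' :=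
          if rIdx = 0 then (pyModAt res 0 (· ++ [r]), sIdx + 1, rm)
          else if rm = r then (pyModAt res (sIdx - 1) (· ++ [r]), sIdx, rm)
          else (pyModAt res sIdx (· ++ [r]), sIdx + 1, r)
        (st'.1, (if st'.2.1 ≥ N then 0 else st'.2.1), rIdx + 1, st'.2.2))
      (res, g % N, k, rem)).1
    = distFrom N (g - 1) res ((contSplit rem t).1 :: runs (contSplit rem t).2) := by
  induction t with
  | nil =>
    intro res g k rem _ _ _
    simp [contSplit, runs, distFrom, pyModAt_nil, pyModAt_id]
  | cons r t ih =>
    intro res g k rem hg hk hlen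
    have hb := emod_bounds hN g
    by_cases hr : rem = r
    · -- continuation of the current run: append at sIdx - 1 (Python index, may be -1)
      simp only [List.foldl_cons, if_neg (by omega : ¬ k = 0), if_pos hr]
      have hnw : (if g % N ≥ N then 0 else g % N) = g % N := by rw [if_neg (by omega)]
      simp only [hnw]
      rw [ih _ g (k + 1) rem hg (by omega) (by rw [length_pyModAt]; exact hlen)]
      -- both sides: merge the two extends at the same resolved server (g-1) % N
      have hpred := emod_pred hN g
      have hb1 := emod_bounds hN (g - 1)
      have hres : pyModAt res (g % N - 1) (· ++ [r])
          = pyModAt res ((g - 1) % N) (· ++ [r]) := by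
        rw [pyModAt_resolve res (g % N - 1) ((g - 1) % N) _ hb1.1 (by omega) ?h2,
            pyModAt_resolve res ((g - 1) % N) ((g - 1) % N) _ hb1.1 (by omega) (Or.inl rfl)]
        case h2 =>
          rw [hpred]
          split
          · right; omega
          · left; omega
      subst hr
      have hmodp : PySem.Int.mod (g - 1) N = (g - 1) % N := PySem.Int.mod_eq_emod_of_pos hN
      simp only [contSplit, if_pos rfl, reduceIte, distFrom, hmodp]
      rw [hres, pyModAt_comp]
      rfl
    · -- new run: append at sIdx, advance and wrap the pointer
      simp only [List.foldl_cons, if_neg (by omega : ¬ k = 0), if_neg hr]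
      have hwrap : (if g % N + 1 ≥ N then 0 else g % N + 1) = (g + 1) % N := (emod_succ hN g).symm
      simp only [hwrap]
      rw [ih _ (g + 1) (k + 1) r (by omega) (by omega) (by rw [length_pyModAt]; exact hlen)]
      have hmod : PySem.Int.mod g N = g % N := PySem.Int.mod_eq_emod_of_pos hN
      have hr' : ¬ r = rem := fun h => hr h.symm
      simp only [contSplit, if_neg hr', distFrom, pyModAt_nil]
      rw [runs_cons]
      simp only [distFrom]
      have hg1 : g + 1 - 1 = g := by ring
      have hg2 : g - 1 + 1 = g := by ring
      rw [hg1, hg2, hmod, pyModAt_comp]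
      rfl

theorem length_result (servers : Int) :
    (((List.range servers.toNat).map fun _ => ([] : List Int)).length : Int) = servers.toNat := by
  simp

-- ===== VERDICT (by name: the statement is the Claim_ definition above) =====
theorem solution_spec : Claim_equal_solution := by
  intro servers sticky requests _ hpre
  unfold Spec_solution solution solution_alt
  obtain ⟨hst, hsv⟩ := hpre
  match requests with
  | [] =>
    cases sticky with
    | false => simp [PySem.List.enumerate_nil]
    | true => exact absurd rfl (hst rfl)
  | r0 :: t =>
    have hN : 0 < servers := hsv (by simp)
    have hNt : (servers.toNat : Int) = servers := by omega
    have hlen : ((((List.range servers.toNat).map fun _ => ([] : List Int))).length : Int) = servers := by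
      rw [length_result]; exact hNt
    set res0 : List (List Int) := (List.range servers.toNat).map fun _ => ([] : List Int) with hres0
    cases sticky with
    | false =>
      -- A: pointer walk; B: singleton groups dealt round-robin
      simp only [Bool.not_false, if_pos rfl, if_neg (Bool.false_ne_true)]
      rw [dist_enum]
      have h0 : (0 : Int) = 0 % servers := by rw [Int.zero_emod]
      conv_lhs => rw [h0]
      exact arestNS hN (r0 :: t) res0 0 le_rfl hlen
    | true =>
      simp only [Bool.not_true, Bool.false_eq_true, if_neg, if_pos rfl, reduceIte]
      rw [dist_enum]
      -- A: first request goes to server 0, pointer moves to 1 % servers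
      simp only [List.foldl_cons, List.headD_cons, if_pos rfl, reduceIte]
      have h1 : (if (1:Int) ≥ servers then 0 else (1:Int)) = 1 % servers := by
        have h := emod_succ hN 0
        rw [Int.zero_emod] at h
        norm_num at h
        exact h.symm
      simp only [zero_add, List.drop_succ_cons, List.drop_zero]
      rw [h1]
      rw [arest hN t _ 1 1 r0 le_rfl le_rfl (by rw [length_pyModAt]; exact hlen)]
      -- B: groups = runs (r0 :: t)
      rw [bgroups t [[r0]] r0 (by simp)]
      simp only [List.length_cons, List.length_nil, List.modify_cons, if_pos rfl]
      -- both sides are distFrom over the runs, after merging the first two extends at server 0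
      have hm0 : PySem.Int.mod 0 servers = 0 := by
        rw [PySem.Int.mod_eq_emod_of_pos hN, Int.zero_emod]
      have hz : (1 : Int) - 1 = 0 := by ring
      rw [hz]
      simp only [reduceIte, List.cons_append, List.nil_append, distFrom, hm0]
      rw [pyModAt_comp]
      simp only [List.cons_append, List.nil_append]
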